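-- pv_equiv track=rewrite | github.com/webplusangels/daily-algorithm | 백준/Gold/17140. 이차원 배열과 연산/이차원 배열과 연산.py | transform
-- ===== SOURCE A (Python) =====
-- from collections import Counter
--
-- def sorrrt(l):
--     count = Counter(l)
--     if 0 in count:
--         count.pop(0)
--     srtd = sorted(count.items(), key=lambda x: (x[1], x[0]))
--     srtd = [elm for tps in srtd for elm in tps]
--     return srtd
--
-- def transform(b):
--     R, C = len(b), len(b[0])
--     m = 0
--     trns = []
--     if R >= C:
--         for i in range(R):
--             line = b[i][:]
--             sorted_line = sorrrt(line)
--             trns.append(sorted_line[:100])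
--             m = max(len(trns[-1]), m)
--             # m x C 같은 배열 만든 뒤에 채워넣으면 될 것 같음 m <= 100
--         new_board = [[0]*m for _ in range(R)]
--         for i in range(R):
--             new_board[i][:len(trns[i])] = trns[i]
--     else:
--         for j in range(C):
--             line = [b[i][j] for i in range(R)]
--             sorted_line = sorrrt(line)
--             trns.append(sorted_line[:100])
--             m = max(len(trns[-1]), m)
--         new_board = [[0]*C for _ in range(m)]
--         for j in range(C):
--             l = len(trns[j])
--             for i in range(m):
--                 if l > i:
--                     new_board[i][j] = trns[j][i]
--                 else:
--                     new_board[i][j] = 0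
--     return new_board
-- ===== SOURCE B (Python) =====
-- def _runs(s):
--     # run-length encode s (equal values are adjacent since s is sorted),
--     # built back-to-front over reversed(s)
--     out = []
--     for v in reversed(s):
--         if out and out[0][0] == v:
--             out[0] = (v, out[0][1] + 1)
--         else:
--             out.insert(0, (v, 1))
--     return out
--
--
-- def _line(line):
--     rs = [p for p in _runs(sorted(line)) if p[0] != 0]
--     rs = sorted(rs, key=lambda p: (p[1], p[0]))
--     return [x for p in rs for x in p][:100]
--
--
-- def transform(b):
--     R, C = len(b), len(b[0])
--     rows = b if R >= C else [[row[j] for row in b] for j in range(C)]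
--     proc = [_line(row) for row in rows]
--     m = 0
--     for p in proc:
--         m = max(len(p), m)
--     padded = [p + [0] * (m - len(p)) for p in proc]
--     if R >= C:
--         return padded
--     return [[padded[j][i] for j in range(C)] for i in range(m)]
-- ===== Notes on version B (the rewrite author's own statement) =====
-- stated objective: alternative
-- what changed: B computes each line's frequencies by sorting the line and run-length-encoding the sorted copy (no Counter/hash counting), then sorts the runs by (count,value); the two mirrored row/column branches are replaced by one row-oriented pass with an input transpose and an output transpose; Pre_ excludes only the inputs where A raises IndexError (empty board, or R<C with a row shorter than row 0), where B raises too.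
import Mathlib
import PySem

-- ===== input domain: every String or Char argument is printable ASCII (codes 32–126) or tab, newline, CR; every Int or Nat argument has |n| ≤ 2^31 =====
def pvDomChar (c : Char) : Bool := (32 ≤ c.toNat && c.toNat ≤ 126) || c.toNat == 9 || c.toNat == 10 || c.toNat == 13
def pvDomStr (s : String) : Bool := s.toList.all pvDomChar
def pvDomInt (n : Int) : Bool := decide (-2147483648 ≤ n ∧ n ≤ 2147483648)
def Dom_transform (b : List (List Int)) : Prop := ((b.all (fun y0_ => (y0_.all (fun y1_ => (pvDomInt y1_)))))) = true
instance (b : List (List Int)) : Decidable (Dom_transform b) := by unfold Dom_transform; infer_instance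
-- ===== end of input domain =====

-- B gets each line's counts by run-length-encoding a sorted copy of the line (no Counter/hash
-- counting) and replaces A's two mirrored row/column branches by one row pass with transposes;
-- objective: alternative (same asymptotic cost, different counting algorithm and decomposition).

-- ===== PORT A =====
def sorrrt (l : List Int) : List Int :=
  let count := PySem.Dict.counter l
  let count := if count.contains 0 then count.erase 0 else count
  let srtd := PySem.List.sorted2 count.items (fun x => x.2) (fun x => x.1)
  srtd.foldl (fun acc tps => acc ++ [tps.1, tps.2]) []

def transform (b : List (List Int)) : List (List Int) :=
  let R := b.length
  let C := (PySem.List.pyGetD b 0 []).length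
  if R ≥ C then
    let st := (List.range R).foldl
      (fun (st : List (List Int) × Nat) (i : Nat) =>
        let line := PySem.List.pyGetD b (i : Int) []
        let sl := (sorrrt line).take 100
        (st.1 ++ [sl], max sl.length st.2)) ([], 0)
    (List.range R).map (fun (i : Nat) =>
      let t := PySem.List.pyGetD st.1 (i : Int) []
      t ++ (List.replicate st.2 (0 : Int)).drop t.length)
  else
    let st := (List.range C).foldl
      (fun (st : List (List Int) × Nat) (j : Nat) =>
        let line := (List.range R).map
          (fun (i : Nat) => PySem.List.pyGetD (PySem.List.pyGetD b (i : Int) []) (j : Int) 0)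
        let sl := (sorrrt line).take 100
        (st.1 ++ [sl], max sl.length st.2)) ([], 0)
    (List.range st.2).map (fun (i : Nat) => (List.range C).map (fun (j : Nat) =>
      let t := PySem.List.pyGetD st.1 (j : Int) []
      if i < t.length then PySem.List.pyGetD t (i : Int) 0 else 0))

-- ===== PORT B =====
-- one step of the reversed-iteration run-length loop ('if out and out[0][0] == v: … else: insert(0, …)')
def pvStep (v : Int) (out : List (Int × Int)) : List (Int × Int) :=
  match out with
  | (w, c) :: r => if w == v then (v, c + 1) :: r else (v, 1) :: (w, c) :: r
  | [] => [(v, 1)]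

-- 'for v in reversed(s): …' building the run list front-first = foldr
def pvRuns (s : List Int) : List (Int × Int) := s.foldr pvStep []

def pvLine (line : List Int) : List Int :=
  let rs := (pvRuns (PySem.List.sorted line (fun x => x))).filter (fun p => !(p.1 == 0))
  let rs := PySem.List.sorted2 rs (fun p => p.2) (fun p => p.1)
  (rs.flatMap (fun p => [p.1, p.2])).take 100

def transform_alt (b : List (List Int)) : List (List Int) :=
  let R := b.length
  let C := (PySem.List.pyGetD b 0 []).length
  let rows := if R ≥ C then b
    else (List.range C).map (fun (j : Nat) => b.map (fun row => PySem.List.pyGetD row (j : Int) 0))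
  let proc := rows.map pvLine
  let m := proc.foldl (fun acc p => max p.length acc) 0
  let padded := proc.map (fun p => p ++ List.replicate (m - p.length) (0 : Int))
  if R ≥ C then padded
  else (List.range m).map (fun (i : Nat) => (List.range C).map (fun (j : Nat) =>
    PySem.List.pyGetD (PySem.List.pyGetD padded (j : Int) []) (i : Int) 0))

-- ===== PRECONDITION & SPEC =====
-- Pre_ excludes exactly the inputs where A raises IndexError: the empty board (b[0]),
-- and boards with R < C some of whose rows are shorter than C (b[i][j]).
def Pre_transform (b : List (List Int)) : Prop :=
  b ≠ [] ∧ (b.length < (PySem.List.pyGetD b 0 []).length →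
    ∀ row ∈ b, (PySem.List.pyGetD b 0 []).length ≤ row.length)
instance (b : List (List Int)) : Decidable (Pre_transform b) := by unfold Pre_transform; infer_instance
def pvWitness_transform : List (List Int) := [[1, 2], [3, 3]]

def Spec_transform (b : List (List Int)) (out : List (List Int)) : Prop := out = transform_alt b
instance (b : List (List Int)) (out : List (List Int)) : Decidable (Spec_transform b out) := by unfold Spec_transform; infer_instance

-- ===== CLAIM (what is proved, stated in full; the proofs are below) =====
def Claim_equal_transform : Prop := ∀ (b : List (List Int)), Dom_transform b → Pre_transform b → Spec_transform b (transform b)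

-- ===== LEMMAS AND PROOFS =====

-- sorted2 with keys (snd, fst) is sorted with the single lexicographic key (snd, fst)
lemma sorted2_eq_sorted_lex (xs : List (Int × Int)) :
    PySem.List.sorted2 xs (fun p => p.2) (fun p => p.1)
      = PySem.List.sorted xs (fun p => toLex (p.2, p.1)) := by
  unfold PySem.List.sorted2 PySem.List.sorted
  dsimp only
  have hb : (fun (a b : Int × Int) =>
        decide (a.2 < b.2) || !decide (b.2 < a.2) && decide (a.1 < b.1))
      = fun (a b : Int × Int) => decide (toLex (a.2, a.1) < toLex (b.2, b.1)) := by
    funext a b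
    have hlex : (toLex (a.2, a.1) < toLex (b.2, b.1)) ↔
        (a.2 < b.2 ∨ (a.2 = b.2 ∧ a.1 < b.1)) := Prod.Lex.toLex_lt_toLex
    by_cases h1 : a.2 < b.2 <;> by_cases h2 : b.2 < a.2 <;> by_cases h3 : a.1 < b.1 <;>
      simp [h1, h2, h3, hlex] <;> omega
  rw [hb]
  simp

lemma pvRuns_ne_nil (x : Int) (u : List Int) : pvRuns (x :: u) ≠ [] := by
  show pvStep x (pvRuns u) ≠ []
  unfold pvStep
  cases h : pvRuns u with
  | nil => simp
  | cons p r => obtain ⟨w, c⟩ := p; dsimp only; split <;> simp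

-- run-length encoding of a sorted list: first components are the distinct values of s,
-- second components their multiplicities, head preserved
lemma runs_spec (s : List Int) (hs : s.Pairwise (· ≤ ·)) :
    ((pvRuns s).map Prod.fst).Nodup ∧
    (∀ v, v ∈ (pvRuns s).map Prod.fst ↔ v ∈ s) ∧
    (pvRuns s = ((pvRuns s).map Prod.fst).map (fun v => (v, (s.count v : Int)))) ∧
    ((pvRuns s).map Prod.fst).head? = s.head? := by
  induction s with
  | nil => simp [pvRuns]
  | cons v t ih =>
    obtain ⟨hv, ht⟩ := List.pairwise_cons.1 hs
    obtain ⟨ihnd, ihmem, ihchar, ihhd⟩ := ih ht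
    have hruns : pvRuns (v :: t) = pvStep v (pvRuns t) := rfl
    cases hR : pvRuns t with
    | nil =>
      have ht0 : t = [] := by
        cases t with
        | nil => rfl
        | cons a u => exact absurd hR (pvRuns_ne_nil a u)
      subst ht0
      simp [hruns, hR, pvStep]
    | cons p r =>
      obtain ⟨w, c⟩ := p
      rw [hR] at ihnd ihmem ihchar ihhd
      have hw_mem : w ∈ t := (ihmem w).1 (by simp)
      have hhead : t.head? = some w := by simpa using ihhd.symm
      have hr_char : r = (r.map Prod.fst).map
          (fun x => (x, (t.count x : Int))) := by
        have := ihchar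
        simp only [List.map_cons] at this
        exact (List.cons.injEq _ _ _ _ ▸ this) |>.2
      have hc : c = (t.count w : Int) := by
        have := ihchar
        simp only [List.map_cons] at this
        have h1 := (List.cons.injEq _ _ _ _ ▸ this) |>.1
        exact congrArg Prod.snd h1
      have hw_not_r : w ∉ r.map Prod.fst := (List.nodup_cons.1 ihnd).1
      have hr_nd : (r.map Prod.fst).Nodup := (List.nodup_cons.1 ihnd).2
      by_cases hwv : w = v
      · -- merged into the head run
        subst hwv
        have hstep : pvRuns (w :: t) = (w, c + 1) :: r := by
          rw [hruns, hR]; simp [pvStep]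
        have hmem' : ∀ x, x ∈ w :: r.map Prod.fst ↔ x ∈ w :: t := by
          intro x
          constructor
          · rintro h
            rcases List.mem_cons.1 h with h | h
            · exact h ▸ List.mem_cons_self
            · exact List.mem_cons_of_mem _ ((ihmem x).1 (List.mem_cons_of_mem _ h))
          · rintro h
            rcases List.mem_cons.1 h with h | h
            · exact h ▸ List.mem_cons_self
            · exact (ihmem x).2 h
        refine ⟨?_, ?_, ?_, ?_⟩
        · rw [hstep]; simpa using ihnd
        · intro x; rw [hstep]; simpa using hmem' x
        · rw [hstep]
          simp only [List.map_cons]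
          refine List.cons_eq_cons.mpr ⟨?_, ?_⟩
          · simp [hc]
          · conv_lhs => rw [hr_char]
            rw [List.map_map, List.map_map]
            apply List.map_congr_left
            intro p hp
            have hxw : p.1 ≠ w := fun h => hw_not_r (h ▸ List.mem_map_of_mem hp)
            simp [Function.comp, Ne.symm hxw]
        · rw [hstep]; simp
      · -- a new run is opened
        have hstep : pvRuns (v :: t) = (v, 1) :: (w, c) :: r := by
          rw [hruns, hR]; simp [pvStep, hwv]
        have hv_not_t : v ∉ t := by
          intro hvt
          rcases t with _ | ⟨a, u⟩
          · cases hvt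
          · have ha : a = w := by simpa using hhead
            subst ha
            have hva : v ≤ a := hv a List.mem_cons_self
            rcases List.mem_cons.1 hvt with h | h
            · exact hwv (h.symm)
            · have hav : a ≤ v := ((List.pairwise_cons.1 ht).1) v h
              exact hwv (le_antisymm hva hav).symm
        refine ⟨?_, ?_, ?_, ?_⟩
        · rw [hstep]
          simp only [List.map_cons]
          refine List.nodup_cons.2 ⟨?_, ihnd⟩
          intro hvmem
          exact hv_not_t ((ihmem v).1 hvmem)
        · intro x
          rw [hstep]
          simp only [List.map_cons, List.mem_cons]
          constructor
          · rintro (h | h)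
            · exact Or.inl h
            · exact Or.inr ((ihmem x).1 (by simpa using h))
          · rintro (h | h)
            · exact Or.inl h
            · have := (ihmem x).2 h
              simpa using Or.inr this
        · rw [hstep]
          simp only [List.map_cons]
          refine List.cons_eq_cons.mpr ⟨?_, ?_⟩
          · simp [List.count_eq_zero_of_not_mem hv_not_t]
          · have hcongr : ∀ x ∈ w :: r.map Prod.fst,
                ((v :: t).count x : Int) = (t.count x : Int) := by
              intro x hx
              have hxt : x ∈ t := (ihmem x).1 hx
              have hxv : x ≠ v := fun h => hv_not_t (h ▸ hxt)
              simp [Ne.symm hxv]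
            have := ihchar
            simp only [List.map_cons] at this ⊢
            rw [this]
            refine List.cons_eq_cons.mpr ⟨?_, ?_⟩
            · rw [hcongr w (by simp)]
            · rw [List.map_map, List.map_map]
              apply List.map_congr_left
              intro p hp
              have h1 := hcongr p.1 (List.mem_cons_of_mem _ (List.mem_map_of_mem hp))
              simp only [Function.comp]
              rw [h1]
        · rw [hstep]; simp

-- A's Counter after popping 0, as items: the distinct nonzero values paired with their counts
lemma items_erase0 (l : List Int) :
    (if (PySem.Dict.counter l).contains 0 then (PySem.Dict.counter l).erase 0
       else PySem.Dict.counter l).items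
    = ((PySem.Set.ofList l).filter (fun k => !(k == 0))).map
        (fun k => (k, (l.count k : Int))) := by
  by_cases h : (PySem.Dict.counter l).contains 0
  · rw [if_pos h]
    show ((PySem.Dict.counter l).items.filter (fun p => !(p.1 == 0))) = _
    rw [PySem.Dict.items_counter, List.filter_map]
    rfl
  · rw [if_neg h]
    rw [PySem.Dict.items_counter]
    rw [show ((PySem.Set.ofList l).filter (fun k => !(k == 0)))
          = PySem.Set.ofList l from ?_]
    · apply List.filter_eq_self.2
      intro k hk
      have hk0 : k ≠ 0 := by
        intro h0
        subst h0
        exact h (by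
          unfold PySem.Dict.contains
          rw [PySem.Dict.items_counter]
          simp only [List.any_map, List.any_eq_true]
          exact ⟨0, hk, by simp⟩)
      simp [hk0]

lemma sorrrt_eq_pairs (l : List Int) :
    sorrrt l = (PySem.List.sorted2
        (((PySem.Set.ofList l).filter (fun k => !(k == 0))).map
          (fun k => (k, (l.count k : Int))))
        (fun p => p.2) (fun p => p.1)).flatMap (fun p => [p.1, p.2]) := by
  unfold sorrrt
  dsimp only
  rw [items_erase0, PySem.List.foldl_append_eq_flatMap
    (g := fun (tps : Int × Int) => [tps.1, tps.2])]
  rw [List.nil_append]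

-- per-line: B's sort + run-length-encode + sort-by-(count,value) equals A's Counter pipeline
lemma line_eq (l : List Int) : pvLine l = (sorrrt l).take 100 := by
  unfold pvLine
  dsimp only
  rw [sorrrt_eq_pairs]
  congr 1
  congr 1
  -- reduce to equality of the two sorted2's
  have hs_pair : (PySem.List.sorted l (fun x => x)).Pairwise (· ≤ ·) := by
    have := PySem.List.sorted_pairwise l (fun x => x)
    simpa using this
  obtain ⟨hnd, hmem, hchar, _⟩ := runs_spec (PySem.List.sorted l (fun x => x)) hs_pair
  have hcount : ∀ v : Int, (PySem.List.sorted l (fun x => x)).count v = l.count v := by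
    intro v
    exact (PySem.List.sorted_perm l (fun x => x) false).count_eq v
  -- B's filtered run list as a map over a nodup value list
  have hB : (pvRuns (PySem.List.sorted l (fun x => x))).filter (fun p => !(p.1 == 0))
      = (((pvRuns (PySem.List.sorted l (fun x => x))).map Prod.fst).filter
          (fun v => !(v == 0))).map (fun v => (v, (l.count v : Int))) := by
    conv_lhs => rw [hchar]
    rw [List.filter_map]
    have : ((fun p : Int × Int => !(p.1 == 0)) ∘
        fun v : Int => (v, ((PySem.List.sorted l (fun x => x)).count v : Int)))
        = fun v : Int => !(v == 0) := by funext v; rfl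
    rw [this]
    apply List.map_congr_left
    intro v _
    rw [hcount v]
  rw [hB, sorted2_eq_sorted_lex, sorted2_eq_sorted_lex]
  apply PySem.List.sorted_eq_sorted_of_perm
  · -- the lex key (snd, fst) is injective
    intro p q h
    have h2 := congrArg (fun x => (ofLex x).1) h
    have h1 := congrArg (fun x => (ofLex x).2) h
    simp at h1 h2
    exact Prod.ext h1 h2
  · -- the two value lists are permutations: nodup with the same members
    apply List.Perm.map
    rw [List.perm_ext_iff_of_nodup (hnd.filter _)
      ((PySem.Set.nodup_ofList l).filter _)]
    intro v
    simp only [List.mem_filter]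
    constructor
    · rintro ⟨hvm, hv0⟩
      refine ⟨?_, hv0⟩
      rw [PySem.Set.mem_ofList]
      have := (hmem v).1 hvm
      rwa [PySem.List.mem_sorted] at this
    · rintro ⟨hvm, hv0⟩
      refine ⟨?_, hv0⟩
      apply (hmem v).2
      rw [PySem.List.mem_sorted]
      rwa [PySem.Set.mem_ofList] at hvm

-- A's append-and-max accumulator loop, in closed form
lemma foldl_snoc_max {α : Type} (g : α → List Int) (l : List α)
    (acc : List (List Int)) (n : Nat) :
    l.foldl (fun (st : List (List Int) × Nat) x => (st.1 ++ [g x], max (g x).length st.2)) (acc, n)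
      = (acc ++ l.map g, l.foldl (fun a x => max (g x).length a) n) := by
  induction l generalizing acc n with
  | nil => simp
  | cons x l ih => simp [ih]

lemma map_range_pyGetD {α β : Type} (d : α) (f : α → β) (xs : List α) :
    (List.range xs.length).map (fun i : Nat => f (PySem.List.pyGetD xs (i : Int) d)) = xs.map f := by
  apply List.ext_getElem
  · simp
  · intro i h1 h2
    simp only [List.getElem_map, List.getElem_range]
    rw [PySem.List.pyGetD_natCast]
    congr 1
    simp at h2
    exact List.getD_eq_getElem xs d h2

lemma foldl_max_le_init (l : List (List Int)) (n : Nat) :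
    n ≤ l.foldl (fun a q => max q.length a) n := by
  induction l generalizing n with
  | nil => simp
  | cons q l ih => exact le_trans (le_max_right q.length n) (ih _)

lemma length_le_foldl_max (l : List (List Int)) (n : Nat) (p : List Int) (hp : p ∈ l) :
    p.length ≤ l.foldl (fun a q => max q.length a) n := by
  induction l generalizing n with
  | nil => cases hp
  | cons q l ih =>
    rcases List.mem_cons.1 hp with h | h
    · subst h
      exact le_trans (le_max_left _ _) (foldl_max_le_init l _)
    · exact ih _ h

lemma pad_get (p : List Int) (m i : Nat) (him : i < m) (hpm : p.length ≤ m) :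
    PySem.List.pyGetD (p ++ List.replicate (m - p.length) (0 : Int)) (i : Int) 0
      = if i < p.length then PySem.List.pyGetD p (i : Int) 0 else 0 := by
  rw [PySem.List.pyGetD_natCast]
  split_ifs with h
  · rw [PySem.List.pyGetD_natCast]
    unfold List.getD
    rw [List.getElem?_append_left h]
  · unfold List.getD
    rw [List.getElem?_append_right (Nat.le_of_not_lt h)]
    rw [List.getElem?_replicate]
    have hlt : i - p.length < m - p.length := by omega
    simp [hlt]

-- ===== VERDICT (by name: the statement is the Claim_ definition above) =====
theorem transform_spec : Claim_equal_transform := by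
  intro b _ _
  show transform b = transform_alt b
  unfold transform transform_alt
  dsimp only
  by_cases hRC : b.length ≥ (PySem.List.pyGetD b 0 []).length
  · rw [if_pos hRC, if_pos hRC, if_pos hRC]
    rw [foldl_snoc_max (fun i : Nat => (sorrrt (PySem.List.pyGetD b (i : Int) [])).take 100)]
    have hg : (List.range b.length).map
        (fun i : Nat => (sorrrt (PySem.List.pyGetD b (i : Int) [])).take 100)
        = b.map pvLine := by
      rw [← map_range_pyGetD ([] : List Int) pvLine b]
      apply List.map_congr_left
      intro i _
      rw [line_eq]
    rw [← hg, List.foldl_map, List.map_map]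
    apply List.map_congr_left
    intro i hi
    have hiR : i < b.length := List.mem_range.1 hi
    dsimp only
    rw [List.nil_append, PySem.List.pyGetD_natCast,
      PySem.List.getD_map_range _ _ _ _ hiR, List.drop_replicate]
    rfl
  · rw [if_neg hRC, if_neg hRC, if_neg hRC]
    rw [foldl_snoc_max (fun j : Nat => (sorrrt ((List.range b.length).map
      (fun i : Nat => PySem.List.pyGetD (PySem.List.pyGetD b (i : Int) []) (j : Int) 0))).take 100)]
    have hg : List.map pvLine ((List.range (PySem.List.pyGetD b 0 []).length).map
          (fun (j : Nat) => b.map (fun row => PySem.List.pyGetD row (j : Int) 0)))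
        = (List.range (PySem.List.pyGetD b 0 []).length).map
            (fun j : Nat => (sorrrt ((List.range b.length).map
              (fun i : Nat => PySem.List.pyGetD (PySem.List.pyGetD b (i : Int) []) (j : Int) 0))).take 100) := by
      rw [List.map_map]
      apply List.map_congr_left
      intro j _
      show pvLine (b.map (fun row => PySem.List.pyGetD row (j : Int) 0)) = _
      rw [line_eq, map_range_pyGetD ([] : List Int) (fun row => PySem.List.pyGetD row (j : Int) 0) b]
    rw [hg, List.foldl_map, List.map_map]
    apply List.map_congr_left
    intro i hi
    apply List.map_congr_left
    intro j hj
    have hiM := List.mem_range.1 hi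
    have hjC : j < (PySem.List.pyGetD b 0 []).length := List.mem_range.1 hj
    dsimp only
    rw [List.nil_append, PySem.List.pyGetD_natCast (d := ([] : List Int)),
      PySem.List.getD_map_range _ _ _ _ hjC,
      PySem.List.pyGetD_natCast (d := ([] : List Int)),
      PySem.List.getD_map_range _ _ _ _ hjC]
    dsimp only [Function.comp]
    rw [pad_get _ _ _ hiM (by
      have h1 := length_le_foldl_max
        ((List.range (PySem.List.pyGetD b 0 []).length).map
          (fun j : Nat => (sorrrt ((List.range b.length).map
            (fun i : Nat => PySem.List.pyGetD (PySem.List.pyGetD b (i : Int) []) (j : Int) 0))).take 100))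
        0 _ (List.mem_map.2 ⟨j, List.mem_range.2 hjC, rfl⟩)
      rwa [List.foldl_map] at h1)]
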